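-- pv_equiv track=rewrite | github.com/rakesh-050791/DS-Algo | Advance/Hashing/02-November-2022.py | solve
-- ===== SOURCE A (Python) =====
-- def solve(A):
--     n = len(A)
--     hashSet = set()
--
--     for i in range(n):
--         x = A[i][0]
--         y = A[i][1]
--
--         element = str(x) +'@'+ str(y)
--         hashSet.add(element)
--     return len(hashSet)
-- ===== SOURCE B (Python) =====
-- def solve(A):
--     keys = sorted(str(r[0]) + '@' + str(r[1]) for r in A)
--     count = 0
--     prev = None
--     for k in keys:
--         if prev is None or k != prev:
--             count += 1
--         prev = k
--     return count
-- ===== Notes on version B (the rewrite author's own statement) =====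
-- stated objective: alternative
-- what changed: replaces the hash-set distinct count with a sort-then-scan: build the same '@'-joined keys, sort them, and count positions where the key differs from its predecessor
import Mathlib
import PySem

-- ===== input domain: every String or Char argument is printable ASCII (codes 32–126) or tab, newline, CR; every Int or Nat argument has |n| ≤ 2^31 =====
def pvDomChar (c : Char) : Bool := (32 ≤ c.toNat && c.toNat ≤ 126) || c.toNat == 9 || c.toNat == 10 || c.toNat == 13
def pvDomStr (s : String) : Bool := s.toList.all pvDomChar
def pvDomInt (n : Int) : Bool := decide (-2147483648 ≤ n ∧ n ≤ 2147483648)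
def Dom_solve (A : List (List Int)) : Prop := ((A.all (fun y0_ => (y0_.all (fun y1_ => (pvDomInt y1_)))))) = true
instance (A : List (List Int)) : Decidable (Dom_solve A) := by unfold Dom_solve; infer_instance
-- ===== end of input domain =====

-- B replaces A's hash-set distinct count by sort-then-scan over the same '@'-joined keys (alternative algorithm, similar cost).


-- ===== PORT A =====
def solve (A : List (List Int)) : Int :=
  let n : Int := A.length
  let hashSet : PySem.Set String :=
    (PySem.List.pyRange 0 n 1).foldl
      (fun s i =>
        let x := PySem.List.pyGetD (PySem.List.pyGetD A i []) 0 0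
        let y := PySem.List.pyGetD (PySem.List.pyGetD A i []) 1 0
        let element := PySem.Str.join "@" [PySem.Int.toStr x, PySem.Int.toStr y]
        PySem.Set.add s element)
      PySem.Set.empty
  PySem.Set.len hashSet

-- ===== PORT B =====
def solve_alt (A : List (List Int)) : Int :=
  let keys := A.map (fun r =>
    PySem.Str.join "@" [PySem.Int.toStr (PySem.List.pyGetD r 0 0),
                        PySem.Int.toStr (PySem.List.pyGetD r 1 0)])
  let ks := PySem.List.sorted keys (fun k => k) false
  (ks.foldl
    (fun st k => (if st.2 = none ∨ st.2 ≠ some k then st.1 + 1 else st.1, some k))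
    ((0 : Int), (none : Option String))).1

-- ===== PRECONDITION & SPEC =====
-- Pre_ excludes exactly the inputs with a row of fewer than two elements, on which A raises IndexError.
def Pre_solve (A : List (List Int)) : Prop := ∀ r ∈ A, 2 ≤ r.length
instance (A : List (List Int)) : Decidable (Pre_solve A) := by unfold Pre_solve; infer_instance
def pvWitness_solve : List (List Int) := [[1, 2], [1, 2], [3, 4]]
def Spec_solve (A : List (List Int)) (out : Int) : Prop := out = solve_alt A
instance (A : List (List Int)) (out : Int) : Decidable (Spec_solve A out) := by unfold Spec_solve; infer_instance

-- ===== CLAIM (what is proved, stated in full; the proofs are below) =====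
def Claim_equal_solve : Prop := ∀ (A : List (List Int)), Dom_solve A → Pre_solve A → Spec_solve A (solve A)

-- ===== LEMMAS AND PROOFS =====

-- the shared key expression
def pvKey (r : List Int) : String :=
  PySem.Str.join "@" [PySem.Int.toStr (PySem.List.pyGetD r 0 0),
                      PySem.Int.toStr (PySem.List.pyGetD r 1 0)]

-- the pure scan count of B, with an explicit previous element
def pvS : Option String → List String → Int
  | _, [] => 0
  | p, k :: t => (if p = none ∨ p ≠ some k then 1 else 0) + pvS (some k) t

theorem pv_foldl_fst (l : List String) : ∀ (c : Int) (p : Option String),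
    (l.foldl (fun st k => (if st.2 = none ∨ st.2 ≠ some k then st.1 + 1 else st.1, some k)) (c, p)).1
      = c + pvS p l := by
  induction l with
  | nil => intro c p; simp [pvS]
  | cons k t ih =>
    intro c p
    simp only [List.foldl_cons, pvS]
    rw [ih]
    split_ifs <;> ring

theorem pv_len_ofList (l : List String) :
    (PySem.Set.ofList l).length = l.toFinset.card := by
  have hd : PySem.List.dedup l = PySem.Set.ofList l := PySem.List.dedup_eq_ofList l
  have h1 : (PySem.List.dedup l).toFinset = l.toFinset := by
    ext x; simp [List.mem_toFinset]
  rw [← hd, ← List.toFinset_card_of_nodup (PySem.List.nodup_dedup l), h1]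

theorem pv_S_sorted (l : List String) (hs : l.Pairwise (· ≤ ·)) :
    (pvS none l = l.toFinset.card) ∧
      ∀ a, (∀ x ∈ l, a ≤ x) → pvS (some a) l = ((l.toFinset.erase a).card : Int) := by
  induction l with
  | nil => simp [pvS]
  | cons k t ih =>
    have hp := (List.pairwise_cons.mp hs)
    obtain ⟨hk, ht⟩ := hp
    obtain ⟨ihn, iha⟩ := ih ht
    have hcard : ((insert k t.toFinset).card : Int) = (t.toFinset.erase k).card + 1 := by
      have : (insert k t.toFinset).card = (t.toFinset.erase k).card + 1 := by
        rw [← Finset.erase_insert_eq_erase]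
        exact (Finset.card_erase_add_one (Finset.mem_insert_self k t.toFinset)).symm
      exact_mod_cast this
    constructor
    · simp only [pvS, List.toFinset_cons]
      rw [iha k hk]
      simp [hcard]
      omega
    · intro a ha
      by_cases hak : a = k
      · subst hak
        simp only [pvS, List.toFinset_cons, Finset.erase_insert_eq_erase]
        rw [iha a hk]
        simp
      · have hat : a ∉ t := by
          intro hmem
          exact hak (le_antisymm (ha k (List.mem_cons_self)) (hk a hmem))
        have hnotin : a ∉ insert k t.toFinset := by
          simp [hak, hat]
        simp only [pvS, List.toFinset_cons]
        rw [iha k hk, Finset.erase_eq_of_notMem hnotin]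
        simp [hak, hcard]
        omega

theorem pv_solve_eq (A : List (List Int)) :
    solve A = (((A.map pvKey).toFinset.card : Nat) : Int) := by
  show PySem.Set.len ((PySem.List.pyRange 0 (A.length : Int) 1).foldl
      (fun s i => PySem.Set.add s (pvKey (PySem.List.pyGetD A i []))) PySem.Set.empty) = _
  rw [show (A.length : Int) = PySem.List.len A from rfl]
  rw [PySem.List.foldl_pyRange_zero_pyGetD A ([] : List Int)
        (fun s r => PySem.Set.add s (pvKey r)) PySem.Set.empty]
  rw [← List.foldl_map]
  rw [show (List.foldl PySem.Set.add PySem.Set.empty (List.map pvKey A))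
        = PySem.Set.ofList (A.map pvKey) from rfl]
  rw [show PySem.Set.len (PySem.Set.ofList (A.map pvKey))
        = ((PySem.Set.ofList (A.map pvKey)).length : Int) from rfl]
  rw [pv_len_ofList]

theorem pv_solve_alt_eq (A : List (List Int)) :
    solve_alt A = (((A.map pvKey).toFinset.card : Nat) : Int) := by
  show ((PySem.List.sorted (A.map pvKey) (fun k => k) false).foldl
      (fun st k => (if st.2 = none ∨ st.2 ≠ some k then st.1 + 1 else st.1, some k))
      ((0 : Int), (none : Option String))).1 = _
  rw [pv_foldl_fst]
  have hs : (PySem.List.sorted (A.map pvKey) (fun k => k) false).Pairwise (· ≤ ·) :=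
    PySem.List.sorted_pairwise (A.map pvKey) (fun k => k)
  have hperm : (PySem.List.sorted (A.map pvKey) (fun k => k) false).Perm (A.map pvKey) :=
    PySem.List.sorted_perm (A.map pvKey) (fun k => k) false
  rw [(pv_S_sorted _ hs).1, List.toFinset_eq_of_perm _ _ hperm]
  ring

-- ===== VERDICT (by name: the statement is the Claim_ definition above) =====
theorem solve_spec : Claim_equal_solve := by
  intro A _ _
  show solve A = solve_alt A
  rw [pv_solve_eq, pv_solve_alt_eq]
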